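-- pv_equiv track=rewrite | github.com/RuslanBabudzhan/QuantumBearings | source/postprocessing/mlcsv.py | full_dicts_join
-- ===== SOURCE A (Python) =====
-- from typing import List, Optional
-- from collections import Counter
--
-- def full_dicts_join(dicts: List[dict]) -> dict:
--     """
--     Full joining of dictionaries.
--     Produces dict with keys that are the union of the key sets of the input dictionaries and
--     values that are lists of input dictionaries values. Empty values are filled with None
--     """
--     joined_dict_keys = [list(d.keys()) for d in dicts]
--     joined_dict_keys = Counter([item for sublist in joined_dict_keys for item in sublist])
--     joined = dict([(key, []) for key in joined_dict_keys])
--     for d in dicts: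
--         d_keys = list(d.keys())
--         for key in joined_dict_keys:
--             if key in d_keys:
--                 joined[key].append(d[key])
--             else:
--                 joined[key].append(None)
--
--     return joined
-- ===== SOURCE B (Python) =====
-- from typing import List
--
--
-- def full_dicts_join(dicts: List[dict]) -> dict:
--     """Full outer join of dicts in ONE streaming pass.
--
--     Keys are discovered on the fly: when a dict introduces a new key, its
--     column is back-filled with None for the dicts already consumed; then every
--     known column is extended with this dict's value (None where missing).
--     """
--     joined = {}
--     seen = 0
--     for d in dicts:
--         for k in d:
--             if k not in joined:
--                 joined[k] = [None] * seen
--         for k in joined: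
--             joined[k].append(d.get(k))
--         seen += 1
--     return joined
-- ===== Notes on version B (the rewrite author's own statement) =====
-- stated objective: alternative
-- what changed: B replaces A's two-phase algorithm (first build the Counter of all keys, then fill every key's row for every dict in lockstep with a linear 'key in d_keys' list scan) with a single streaming pass that discovers keys on the fly, back-fills a newly seen key's column with [None]*seen for the dicts already consumed, and extends every known column with d.get(k).
import Mathlib
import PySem

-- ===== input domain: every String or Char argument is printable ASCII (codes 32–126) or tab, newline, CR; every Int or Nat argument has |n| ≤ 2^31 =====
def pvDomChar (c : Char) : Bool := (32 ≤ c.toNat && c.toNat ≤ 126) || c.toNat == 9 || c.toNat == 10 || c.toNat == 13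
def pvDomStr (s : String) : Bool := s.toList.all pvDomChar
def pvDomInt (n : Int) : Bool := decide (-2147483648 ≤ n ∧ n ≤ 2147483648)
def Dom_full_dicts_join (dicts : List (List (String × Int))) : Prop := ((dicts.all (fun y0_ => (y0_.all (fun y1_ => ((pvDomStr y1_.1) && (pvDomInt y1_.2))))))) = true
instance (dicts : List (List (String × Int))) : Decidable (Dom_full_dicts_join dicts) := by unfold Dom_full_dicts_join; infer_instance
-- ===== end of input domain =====

-- B replaces A's two-phase Counter-then-fill (dicts outer, all keys inner, lockstep appends)
-- with a single streaming pass that discovers keys on the fly and back-fills new columns with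
-- [None]*seen; same result, a genuinely different decomposition (objective: alternative).

-- ===== PORT A =====
-- Each input dict (List (String × Int) in insertion order) is viewed as PySem.Dict.mk d.
def full_dicts_join (dicts : List (List (String × Int))) : List (String × List (Option Int)) :=
  let joined_dict_keys := dicts.map (fun d => (PySem.Dict.mk d).keys)
  let cnt := PySem.Dict.counter (joined_dict_keys.flatMap (fun l => l))
  let joined0 : PySem.Dict String (List (Option Int)) :=
    PySem.Dict.ofList (cnt.keys.map (fun key => (key, ([] : List (Option Int)))))
  let joined := dicts.foldl (fun joined d =>
    let dd := PySem.Dict.mk d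
    let d_keys := dd.keys
    cnt.keys.foldl (fun joined key =>
      if key ∈ d_keys then
        -- key present: Python appends d[key]; get? is some here under the guard
        joined.modify key [] (fun l => l ++ [dd.get? key])
      else
        joined.modify key [] (fun l => l ++ [(none : Option Int)])) joined) joined0
  joined.items

-- ===== PORT B =====
-- streaming pass; state = (joined dict so far, number of dicts seen)
def full_dicts_join_alt (dicts : List (List (String × Int))) : List (String × List (Option Int)) :=
  (dicts.foldl (fun (st : PySem.Dict String (List (Option Int)) × Nat) d =>
      let dd := PySem.Dict.mk d
      -- for k in d: if k not in joined: joined[k] = [None] * seen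
      let j1 := dd.keys.foldl (fun j k =>
          if j.contains k then j
          else j.insert k (List.replicate st.2 (none : Option Int))) st.1
      -- for k in joined: joined[k].append(d.get(k))
      let j2 := j1.keys.foldl (fun j k => j.modify k [] (fun l => l ++ [dd.get? k])) j1
      (j2, st.2 + 1))
    (PySem.Dict.empty, 0)).1.items

-- ===== PRECONDITION & SPEC =====
def Spec_full_dicts_join (dicts : List (List (String × Int))) (out : List (String × List (Option Int))) : Prop := out = full_dicts_join_alt dicts
instance (dicts : List (List (String × Int))) (out : List (String × List (Option Int))) : Decidable (Spec_full_dicts_join dicts out) := by unfold Spec_full_dicts_join; infer_instance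

-- ===== CLAIM (what is proved, stated in full; the proofs are below) =====
def Claim_equal_full_dicts_join : Prop := ∀ (dicts : List (List (String × Int))), Dom_full_dicts_join dicts → Spec_full_dicts_join dicts (full_dicts_join dicts)

-- ===== LEMMAS AND PROOFS =====

-- the union key list (first occurrences) and the canonical joined table both ports compute
def pvKeys (dicts : List (List (String × Int))) : List String :=
  PySem.Set.ofList (dicts.flatMap (fun d => (PySem.Dict.mk d).keys))

def pvJoin (dicts : List (List (String × Int))) : List (String × List (Option Int)) :=
  (pvKeys dicts).map (fun k => (k, dicts.map (fun d => (PySem.Dict.mk d).get? k)))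

-- A's (and B's phase-2) inner loop over key list ks: effect on the value stored at one key k.
theorem pv_inner_getD {ν : Type} (ks : List String) (f : String → Option ν)
    (j : PySem.Dict String (List (Option ν))) (k : String) (hnd : ks.Nodup) :
    (ks.foldl (fun j key => j.modify key [] (fun l => l ++ [f key])) j).getD k [] =
      if k ∈ ks then j.getD k [] ++ [f k] else j.getD k [] := by
  induction ks generalizing j with
  | nil => simp
  | cons a t ih =>
    simp only [List.foldl_cons, List.nodup_cons] at *
    rw [ih _ hnd.2]
    by_cases hka : k = a
    · subst hka
      simp [hnd.1]
    · simp [PySem.Dict.getD_modify, hka, List.mem_cons]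

-- the modify loop keeps the key list unchanged when every iterated key is already present.
theorem pv_inner_keys {ν : Type} (ks : List String) (f : String → Option ν)
    (j : PySem.Dict String (List (Option ν))) (hsub : ∀ x ∈ ks, x ∈ j.keys) :
    (ks.foldl (fun j key => j.modify key [] (fun l => l ++ [f key])) j).keys = j.keys := by
  have h := PySem.Dict.keys_foldl_modify ks ([] : List (Option ν))
      (fun _ key => (fun l => l ++ [f key])) j
  rw [h, PySem.Set.update_eq_append_filter]
  have : List.filter (fun y => !(PySem.Set.contains j.keys y)) (PySem.Set.ofList ks) = [] := by
    apply List.filter_eq_nil_iff.mpr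
    intro x hx
    have hxk : x ∈ ks := (PySem.Set.mem_ofList ks x).mp hx
    simpa using hsub x hxk
  rw [this, List.append_nil]

-- initial dict of A: items are exactly (k, []) over the union keys
theorem pv_init_items (ks : List String) (hnd : ks.Nodup) :
    (PySem.Dict.ofList (ks.map (fun key => (key, ([] : List (Option Int)))))).items
      = ks.map (fun key => (key, ([] : List (Option Int)))) := by
  have h := PySem.Dict.items_foldl_insert_fresh (ks.map (fun key => (key, ([] : List (Option Int)))))
      Prod.fst Prod.snd PySem.Dict.empty (by simp) (by simpa [Function.comp_def] using hnd)
  simpa [PySem.Dict.ofList, PySem.Dict.update] using h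

-- value column at key k after A's outer loop
theorem pv_outer_getD (ds : List (List (String × Int))) (ks : List String) (hnd : ks.Nodup)
    (k : String) (hk : k ∈ ks)
    (hsub : ∀ d ∈ ds, ∀ x ∈ (PySem.Dict.mk d).keys, x ∈ ks)
    (j : PySem.Dict String (List (Option Int))) (hkeys : j.keys = ks) :
    (ds.foldl (fun joined d =>
      ks.foldl (fun joined key =>
        if key ∈ (PySem.Dict.mk d).keys then
          joined.modify key [] (fun l => l ++ [(PySem.Dict.mk d).get? key])
        else
          joined.modify key [] (fun l => l ++ [(none : Option Int)])) joined) j).getD k []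
      = j.getD k [] ++ ds.map (fun d => (PySem.Dict.mk d).get? k) := by
  induction ds generalizing j with
  | nil => simp
  | cons d t ih =>
    simp only [List.foldl_cons, List.map_cons]
    have hstep : (fun (joined : PySem.Dict String (List (Option Int))) key =>
        if key ∈ (PySem.Dict.mk d).keys then
          joined.modify key [] (fun l => l ++ [(PySem.Dict.mk d).get? key])
        else
          joined.modify key [] (fun l => l ++ [(none : Option Int)]))
        = (fun joined key => joined.modify key []
            (fun l => l ++ [(PySem.Dict.mk d).get? key])) := by
      funext joined key
      by_cases h : key ∈ (PySem.Dict.mk d).keys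
      · rw [if_pos h]
      · rw [if_neg h, (PySem.Dict.get?_eq_none_iff_not_mem_keys (PySem.Dict.mk d) key).mpr h]
    rw [hstep]
    rw [ih (fun d' hd' => hsub d' (List.mem_cons_of_mem _ hd'))
        _ (by rw [pv_inner_keys _ _ _ (by rw [hkeys]; exact fun x hx => hx), hkeys])]
    rw [pv_inner_getD _ _ _ _ hnd]
    simp [hk]

theorem pv_keys_invariant (ds : List (List (String × Int))) (ks : List String)
    (j : PySem.Dict String (List (Option Int))) (hkeys : j.keys = ks) :
    (ds.foldl (fun joined d =>
      ks.foldl (fun joined key =>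
        if key ∈ (PySem.Dict.mk d).keys then
          joined.modify key [] (fun l => l ++ [(PySem.Dict.mk d).get? key])
        else
          joined.modify key [] (fun l => l ++ [(none : Option Int)])) joined) j).keys = ks := by
  induction ds generalizing j with
  | nil => exact hkeys
  | cons d t ih =>
    simp only [List.foldl_cons]
    apply ih
    have hstep : (fun (joined : PySem.Dict String (List (Option Int))) key =>
        if key ∈ (PySem.Dict.mk d).keys then
          joined.modify key [] (fun l => l ++ [(PySem.Dict.mk d).get? key])
        else
          joined.modify key [] (fun l => l ++ [(none : Option Int)]))
        = (fun joined key => joined.modify key []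
            (fun l => l ++ [(PySem.Dict.mk d).get? key])) := by
      funext joined key
      by_cases h : key ∈ (PySem.Dict.mk d).keys
      · rw [if_pos h]
      · rw [if_neg h, (PySem.Dict.get?_eq_none_iff_not_mem_keys (PySem.Dict.mk d) key).mpr h]
    rw [hstep, pv_inner_keys _ _ _ (by rw [hkeys]; exact fun x hx => hx), hkeys]

-- A computes the canonical table
theorem pvA_eq (dicts : List (List (String × Int))) :
    full_dicts_join dicts = pvJoin dicts := by
  unfold full_dicts_join pvJoin
  simp only []
  set ks := pvKeys dicts with hks
  have hnd : ks.Nodup := PySem.Set.nodup_ofList _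
  have hcntkeys : (PySem.Dict.counter ((dicts.map (fun d => (PySem.Dict.mk d).keys)).flatMap (fun l => l))).keys = ks := by
    rw [PySem.Dict.keys_counter]
    simp [hks, pvKeys, List.flatMap_def, Function.comp_def]
  rw [hcntkeys]
  have hinit := pv_init_items ks hnd
  have hinitkeys : (PySem.Dict.ofList (ks.map (fun key => (key, ([] : List (Option Int)))))).keys = ks := by
    show ((PySem.Dict.ofList (ks.map (fun key => (key, ([] : List (Option Int)))))).items.map Prod.fst) = ks
    rw [hinit]; simp [Function.comp_def]
  have hsub : ∀ d ∈ dicts, ∀ x ∈ (PySem.Dict.mk d).keys, x ∈ ks := by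
    intro d hd x hx
    rw [hks, pvKeys]
    exact (PySem.Set.mem_ofList _ _).mpr (List.mem_flatMap.mpr ⟨d, hd, hx⟩)
  set J := dicts.foldl (fun joined d =>
      ks.foldl (fun joined key =>
        if key ∈ (PySem.Dict.mk d).keys then
          joined.modify key [] (fun l => l ++ [(PySem.Dict.mk d).get? key])
        else
          joined.modify key [] (fun l => l ++ [(none : Option Int)])) joined)
      (PySem.Dict.ofList (ks.map (fun key => (key, ([] : List (Option Int)))))) with hJ
  have hJkeys : J.keys = ks := pv_keys_invariant dicts ks _ hinitkeys
  have hJitems : J.items = ks.map (fun k => (k, J.getD k [])) := by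
    have := PySem.Dict.items_eq_map_keys J (by rw [hJkeys]; exact hnd) ([] : List (Option Int))
    rw [hJkeys] at this; exact this
  rw [hJitems]
  apply List.map_congr_left
  intro k hkmem
  have hgetD : J.getD k [] = dicts.map (fun d => (PySem.Dict.mk d).get? k) := by
    rw [hJ, pv_outer_getD dicts ks hnd k hkmem hsub _ hinitkeys]
    have : (PySem.Dict.ofList (ks.map (fun key => (key, ([] : List (Option Int)))))).getD k [] = [] := by
      apply PySem.Dict.getD_of_mem_items (v := ([] : List (Option Int)))
      · rw [hinit]; exact List.mem_map_of_mem hkmem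
      · rw [hinitkeys]; exact hnd
    rw [this]; simp
  rw [hgetD]

-- ===== B-side lemmas =====

-- B's phase-1 fill loop: keys become the set-update of the old keys
theorem pv_fill_keys (l : List String) (n : Nat)
    (j : PySem.Dict String (List (Option Int))) :
    (l.foldl (fun j k => if j.contains k then j
        else j.insert k (List.replicate n (none : Option Int))) j).keys
      = PySem.Set.update j.keys l := by
  induction l generalizing j with
  | nil => simp [PySem.Set.update]
  | cons a t ih =>
    simp only [List.foldl_cons]
    rw [PySem.Set.update_cons]
    by_cases h : j.contains a = true
    · have hmem : a ∈ j.keys := (PySem.Dict.contains_iff_mem_keys j a).mp h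
      rw [if_pos h, ih]
      have hadd : PySem.Set.add j.keys a = j.keys := by
        simp [PySem.Set.add, PySem.Set.contains, hmem]
      rw [hadd]
    · have hmem : a ∉ j.keys := fun hm => h ((PySem.Dict.contains_iff_mem_keys j a).mpr hm)
      rw [if_neg h, ih,
        PySem.Dict.keys_insert_of_not_contains j _ (Bool.eq_false_iff.mpr h)]
      have hadd : PySem.Set.add j.keys a = j.keys ++ [a] := by
        simp [PySem.Set.add, PySem.Set.contains, hmem]
      rw [hadd]

-- B's phase-1 fill loop: effect on the stored value at one key
theorem pv_fill_getD (l : List String) (n : Nat)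
    (j : PySem.Dict String (List (Option Int))) (k : String) :
    (l.foldl (fun j k => if j.contains k then j
        else j.insert k (List.replicate n (none : Option Int))) j).getD k []
      = if k ∈ j.keys then j.getD k []
        else if k ∈ l then List.replicate n (none : Option Int) else [] := by
  induction l generalizing j with
  | nil =>
    simp only [List.foldl_nil, List.not_mem_nil, if_false]
    by_cases h : k ∈ j.keys
    · rw [if_pos h]
    · rw [if_neg h]
      exact PySem.Dict.getD_of_not_contains j _
        (Bool.eq_false_iff.mpr (fun hc => h ((PySem.Dict.contains_iff_mem_keys j k).mp hc)))
  | cons a t ih =>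
    simp only [List.foldl_cons]
    by_cases h : j.contains a = true
    · rw [if_pos h, ih]
      have ha : a ∈ j.keys := (PySem.Dict.contains_iff_mem_keys j a).mp h
      by_cases hk : k ∈ j.keys
      · simp [hk]
      · have hka : k ≠ a := fun he => hk (he ▸ ha)
        simp [hk, List.mem_cons, hka]
    · rw [if_neg h, ih]
      have hmem : a ∉ j.keys := fun hm => h ((PySem.Dict.contains_iff_mem_keys j a).mpr hm)
      have hkeys : (j.insert a (List.replicate n (none : Option Int))).keys = j.keys ++ [a] :=
        PySem.Dict.keys_insert_of_not_contains j _ (Bool.eq_false_iff.mpr h)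
      by_cases hka : k = a
      · subst hka
        simp [hkeys, hmem]
      · by_cases hk : k ∈ j.keys
        · simp [hkeys, hk, PySem.Dict.getD_insert, hka]
        · simp [hkeys, hk, hka, List.mem_cons]

-- columns of a key unseen in the prefix are all-None
theorem pv_replicate_of_not_mem (p : List (List (String × Int))) (k : String)
    (h : ∀ d ∈ p, k ∉ (PySem.Dict.mk d).keys) :
    p.map (fun d => (PySem.Dict.mk d).get? k) = List.replicate p.length (none : Option Int) := by
  rw [List.eq_replicate_iff]
  constructor
  · simp
  · intro b hb
    rcases List.mem_map.mp hb with ⟨d, hd, he⟩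
    rw [← he]
    exact (PySem.Dict.get?_eq_none_iff_not_mem_keys _ _).mpr (h d hd)

-- the step of B's streaming fold, named for the proofs (definitionally the lambda in the port)
def pvBStep (st : PySem.Dict String (List (Option Int)) × Nat) (d : List (String × Int)) :
    PySem.Dict String (List (Option Int)) × Nat :=
  let dd := PySem.Dict.mk d
  let j1 := dd.keys.foldl (fun j k =>
      if j.contains k then j
      else j.insert k (List.replicate st.2 (none : Option Int))) st.1
  let j2 := j1.keys.foldl (fun j k => j.modify k [] (fun l => l ++ [dd.get? k])) j1
  (j2, st.2 + 1)

-- B's main invariant: after folding the remaining dicts ds from a state describing prefix p,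
-- the dict holds the canonical table of p ++ ds.
theorem pvB_invariant (ds p : List (List (String × Int)))
    (J : PySem.Dict String (List (Option Int)))
    (hkeys : J.keys = pvKeys p)
    (hget : ∀ k ∈ J.keys, J.getD k [] = p.map (fun d => (PySem.Dict.mk d).get? k)) :
    ((ds.foldl pvBStep (J, p.length)).1.keys = pvKeys (p ++ ds))
    ∧ (∀ k ∈ pvKeys (p ++ ds),
        (ds.foldl pvBStep (J, p.length)).1.getD k []
          = (p ++ ds).map (fun d => (PySem.Dict.mk d).get? k)) := by
  induction ds generalizing p J with
  | nil =>
    refine ⟨by simpa using hkeys, ?_⟩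
    intro k hk
    simp only [List.append_nil]
    exact hget k (by rw [hkeys]; simpa using hk)
  | cons d t ih =>
    simp only [List.foldl_cons]
    set dd := PySem.Dict.mk d with hdd
    set j1 := dd.keys.foldl (fun j k =>
        if j.contains k then j
        else j.insert k (List.replicate p.length (none : Option Int))) J with hj1
    set j2 := j1.keys.foldl (fun j k => j.modify k [] (fun l => l ++ [dd.get? k])) j1 with hj2
    have hstep : pvBStep (J, p.length) d = (j2, p.length + 1) := rfl
    rw [hstep]
    -- keys after phase 1 = pvKeys (p ++ [d])
    have hj1keys : j1.keys = pvKeys (p ++ [d]) := by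
      rw [hj1, pv_fill_keys, hkeys, pvKeys, pvKeys]
      rw [List.flatMap_append, PySem.Set.ofList_append]
      simp [hdd]
    have hj1nd : j1.keys.Nodup := by rw [hj1keys]; exact PySem.Set.nodup_ofList _
    -- phase 2 preserves keys
    have hj2keys : j2.keys = pvKeys (p ++ [d]) := by
      rw [hj2, pv_inner_keys _ _ _ (fun x hx => hx), hj1keys]
    -- value after phase 1
    have hj1get : ∀ k ∈ j1.keys, j1.getD k [] = p.map (fun d' => (PySem.Dict.mk d').get? k) := by
      intro k hk
      rw [hj1, pv_fill_getD]
      by_cases hkJ : k ∈ J.keys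
      · rw [if_pos hkJ]; exact hget k hkJ
      · rw [if_neg hkJ]
        have hkd : k ∈ dd.keys := by
          rw [hj1keys, pvKeys] at hk
          have := (PySem.Set.mem_ofList _ _).mp hk
          rcases List.mem_flatMap.mp this with ⟨d', hd', hkd'⟩
          rcases List.mem_append.mp hd' with hp | hone
          · exact absurd (by rw [hkeys, pvKeys]
                             exact (PySem.Set.mem_ofList _ _).mpr
                               (List.mem_flatMap.mpr ⟨d', hp, hkd'⟩)) hkJ
          · rcases List.mem_singleton.mp hone with rfl
            exact hkd'
        rw [if_pos hkd]
        refine (pv_replicate_of_not_mem p k ?_).symm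
        intro d' hd' hkd'
        exact hkJ (by rw [hkeys, pvKeys]
                      exact (PySem.Set.mem_ofList _ _).mpr
                        (List.mem_flatMap.mpr ⟨d', hd', hkd'⟩))
    -- value after phase 2
    have hj2get : ∀ k ∈ j2.keys,
        j2.getD k [] = (p ++ [d]).map (fun d' => (PySem.Dict.mk d').get? k) := by
      intro k hk
      rw [hj2, pv_inner_getD _ _ _ _ hj1nd]
      have hkj1 : k ∈ j1.keys := by rw [hj1keys, ← hj2keys]; exact hk
      rw [if_pos hkj1, hj1get k hkj1]
      simp [hdd]
    have hlen : p.length + 1 = (p ++ [d]).length := by simp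
    rw [hlen]
    have hinv := ih (p ++ [d]) j2 hj2keys hj2get
    constructor
    · rw [hinv.1]; simp
    · intro k hk
      have hk' : k ∈ pvKeys ((p ++ [d]) ++ t) := by simpa using hk
      have h2 := hinv.2 k hk'
      simpa using h2

-- B computes the canonical table
theorem pvB_eq (dicts : List (List (String × Int))) :
    full_dicts_join_alt dicts = pvJoin dicts := by
  have halt : full_dicts_join_alt dicts = (dicts.foldl pvBStep (PySem.Dict.empty, 0)).1.items := rfl
  rw [halt]
  unfold pvJoin
  have hinv := pvB_invariant dicts [] PySem.Dict.empty (by simp [pvKeys]) (by simp)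
  simp only [List.nil_append, List.length_nil] at hinv
  have hnd : (dicts.foldl pvBStep (PySem.Dict.empty, 0)).1.keys.Nodup := by
    rw [hinv.1]; exact PySem.Set.nodup_ofList _
  rw [PySem.Dict.items_eq_map_keys _ hnd ([] : List (Option Int)), hinv.1]
  apply List.map_congr_left
  intro k hkmem
  rw [hinv.2 k hkmem]

-- ===== VERDICT (by name: the statement is the Claim_ definition above) =====
theorem full_dicts_join_spec : Claim_equal_full_dicts_join := by
  intro dicts _
  unfold Spec_full_dicts_join
  rw [pvA_eq, pvB_eq]
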